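-- pv_equiv track=rewrite | github.com/soyukke/lean-unsolved | scripts/collatz_symbolic.py | syracuse_symbol_orbit
-- ===== SOURCE A (Python) =====
-- def syracuse_with_symbol(n):
--     """
--     奇数 n に対する Syracuse map と記号を返す。
--     A = 上昇 (v2=1, n ≡ 3 mod 4)
--     D_k = 下降 (v2=k, k>=2)
--     """
--     x = 3 * n + 1
--     v2 = 0
--     while x % 2 == 0:
--         x //= 2
--         v2 += 1
--     if v2 == 1:
--         symbol = 'A'
--     else:
--         symbol = f'D{v2}'
--     return x, symbol
--
-- def syracuse_symbol_orbit(n, max_steps=1000):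
--     """奇数 n からの Syracuse 軌道を記号列に変換"""
--     symbols = []
--     x = n
--     for _ in range(max_steps):
--         if x == 1:
--             break
--         x_new, sym = syracuse_with_symbol(x)
--         symbols.append(sym)
--         x = x_new
--     return symbols
-- ===== SOURCE B (Python) =====
-- def syracuse_symbol_orbit(n, max_steps=1000):
--     # One fused loop; the 2-adic valuation of 3x+1 is taken in one bit-level
--     # step ((m & -m).bit_length() - 1) instead of a repeated-halving loop.
--     symbols = []
--     x = n
--     for _ in range(max_steps):
--         if x == 1:
--             break
--         m = 3 * x + 1
--         v2 = (m & -m).bit_length() - 1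
--         x = m >> v2
--         symbols.append('A' if v2 == 1 else 'D%d' % v2)
--     return symbols
-- ===== Notes on version B (the rewrite author's own statement) =====
-- stated objective: alternative
-- what changed: The helper is inlined and the while-loop 2-adic valuation (repeated halving) is replaced by the closed-form lowest-set-bit computation (m & -m).bit_length() - 1 followed by a single shift.
import Mathlib
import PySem

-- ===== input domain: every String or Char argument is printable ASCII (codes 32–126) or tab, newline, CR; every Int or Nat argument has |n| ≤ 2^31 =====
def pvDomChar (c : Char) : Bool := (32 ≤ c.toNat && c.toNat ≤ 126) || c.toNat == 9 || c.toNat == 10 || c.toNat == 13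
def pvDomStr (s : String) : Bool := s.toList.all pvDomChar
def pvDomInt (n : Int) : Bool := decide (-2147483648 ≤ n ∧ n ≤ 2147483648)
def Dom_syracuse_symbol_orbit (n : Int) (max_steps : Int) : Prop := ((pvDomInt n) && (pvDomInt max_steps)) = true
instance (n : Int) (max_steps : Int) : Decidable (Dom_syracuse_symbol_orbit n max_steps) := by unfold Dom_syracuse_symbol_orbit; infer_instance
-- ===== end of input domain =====

-- B inlines A's helper and replaces the repeated-halving valuation loop by the
-- bit-level closed form (m & -m).bit_length() - 1 plus one shift (objective: alternative).

-- ===== PORT A =====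
-- 'while x % 2 == 0: x //= 2; v2 += 1'.  The 'x ≠ 0' conjunct is a totality
-- guard only (at x = 0 the Python loop would not terminate; x = 3*n+1 is never 0).
def pvDivLoop (x : Int) (v2 : Int) : Int × Int :=
  if h : PySem.Int.mod x 2 = 0 ∧ x ≠ 0 then
    pvDivLoop (PySem.Int.floordiv x 2) (v2 + 1)
  else
    (x, v2)
termination_by x.natAbs
decreasing_by
  rw [PySem.Int.floordiv_eq_ediv_of_pos (by norm_num : (0:Int) < 2)]
  rw [PySem.Int.mod_eq_emod_of_pos (by norm_num : (0:Int) < 2)] at h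
  omega

def syracuse_with_symbol (n : Int) : Int × String :=
  let x := 3 * n + 1
  let r := pvDivLoop x 0
  let symbol := if r.2 = 1 then "A" else "D" ++ PySem.Int.toStr r.2
  (r.1, symbol)

def pvOrbitA (x : Int) (fuel : Nat) (symbols : List String) : List String :=
  match fuel with
  | 0 => symbols
  | k + 1 =>
    if x = 1 then symbols
    else
      let r := syracuse_with_symbol x
      pvOrbitA r.1 k (symbols ++ [r.2])

def syracuse_symbol_orbit (n : Int) (max_steps : Int) : List String :=
  pvOrbitA n max_steps.toNat []

-- ===== PORT B =====
-- '(m & -m).bit_length() - 1' is the Nat expression below (Nat subtraction is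
-- exact here: m = 3*x+1 is never 0, so the bit length is at least 1).
def pvOrbitB (x : Int) (fuel : Nat) (symbols : List String) : List String :=
  match fuel with
  | 0 => symbols
  | k + 1 =>
    if x = 1 then symbols
    else
      let m := 3 * x + 1
      let v2 := PySem.Int.bitLength (PySem.Int.band m (-m)) - 1
      pvOrbitB (m >>> v2) k
        (symbols ++ [if (v2 : Int) = 1 then "A" else "D" ++ PySem.Int.toStr (v2 : Int)])

def syracuse_symbol_orbit_alt (n : Int) (max_steps : Int) : List String :=
  pvOrbitB n max_steps.toNat []

-- ===== PRECONDITION & SPEC =====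
def Spec_syracuse_symbol_orbit (n : Int) (max_steps : Int) (out : List String) : Prop := out = syracuse_symbol_orbit_alt n max_steps
instance (n : Int) (max_steps : Int) (out : List String) : Decidable (Spec_syracuse_symbol_orbit n max_steps out) := by unfold Spec_syracuse_symbol_orbit; infer_instance

-- ===== CLAIM (what is proved, stated in full; the proofs are below) =====
def Claim_equal_syracuse_symbol_orbit : Prop := ∀ (n : Int) (max_steps : Int), Dom_syracuse_symbol_orbit n max_steps → Spec_syracuse_symbol_orbit n max_steps (syracuse_symbol_orbit n max_steps)

-- ===== LEMMAS AND PROOFS =====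

-- p odd: p &&& (p-1) clears the low bit, leaving p - 1.
theorem pv_and_pred_odd (p : Nat) (hp : p % 2 = 1) : p &&& (p - 1) = p - 1 := by
  apply Nat.eq_of_testBit_eq
  intro i
  cases i with
  | zero =>
      have h1 : (p - 1) % 2 = 0 := by omega
      simp [Nat.testBit_and, Nat.testBit_zero, h1]
  | succ i =>
      have h2 : (p - 1) / 2 = p / 2 := by omega
      rw [Nat.testBit_and]
      simp [Nat.testBit_add_one, h2]

-- even case halves: (2q) &&& (2q-1) = 2 * (q &&& (q-1)).
theorem pv_and_pred_even (q : Nat) (hq : 0 < q) :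
    (2 * q) &&& (2 * q - 1) = 2 * (q &&& (q - 1)) := by
  apply Nat.eq_of_testBit_eq
  intro i
  cases i with
  | zero =>
      simp [Nat.testBit_and, Nat.testBit_zero, Nat.mul_mod_right]
  | succ i =>
      have h2 : (2 * q - 1) / 2 = q - 1 := by omega
      have h3 : (2 * q) / 2 = q := by omega
      have h4 : (2 * (q &&& (q - 1))) / 2 = q &&& (q - 1) := by omega
      rw [Nat.testBit_and]
      simp [Nat.testBit_and, Nat.testBit_add_one, h2, h3, h4]

-- Python's m & -m, through PySem.Int.band, as a Nat expression on |m|.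
theorem pv_band_neg_self (m : Int) (hm : m ≠ 0) :
    PySem.Int.band m (-m) = ((m.natAbs - (m.natAbs &&& (m.natAbs - 1)) : Nat) : Int) := by
  unfold PySem.Int.band
  split_ifs with h1 h2 h2
  · omega
  · have e1 : m.toNat = m.natAbs := by omega
    have e2 : (-(-m) - 1).toNat = m.natAbs - 1 := by omega
    rw [e1, e2]
  · have e1 : (-m).toNat = m.natAbs := by omega
    have e2 : (-m - 1).toNat = m.natAbs - 1 := by omega
    rw [e1, e2]
  · omega

theorem pv_band_pos (m : Int) (hm : m ≠ 0) : 0 < PySem.Int.band m (-m) := by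
  rw [pv_band_neg_self m hm]
  have h1 : m.natAbs &&& (m.natAbs - 1) ≤ m.natAbs - 1 := Nat.and_le_right
  have h2 : 0 < m.natAbs := by omega
  omega

-- The divide-out-twos loop equals the shift by the bit-trick valuation.
theorem pv_divLoop_eq (p : Nat) : ∀ m : Int, m.natAbs = p → m ≠ 0 → ∀ v : Int,
    pvDivLoop m v = (m >>> (PySem.Int.bitLength (PySem.Int.band m (-m)) - 1),
      v + ((PySem.Int.bitLength (PySem.Int.band m (-m)) - 1 : Nat) : Int)) := by
  induction p using Nat.strong_induction_on with
  | _ p ih =>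
    intro m hp hm v
    rcases Int.emod_two_eq_zero_or_one m with he | ho
    · -- m even: loop runs once more
      have hmod : PySem.Int.mod m 2 = 0 := by
        rw [PySem.Int.mod_eq_emod_of_pos (by norm_num : (0:Int) < 2)]; exact he
      have hfd : PySem.Int.floordiv m 2 = m / 2 :=
        PySem.Int.floordiv_eq_ediv_of_pos (by norm_num)
      have hm2 : m / 2 ≠ 0 := by omega
      have habs : (m / 2).natAbs = p / 2 := by omega
      have hplt : p / 2 < p := by omega
      -- band halves together with m
      have hq : 0 < (m / 2).natAbs := by omega
      have hpe : m.natAbs = 2 * (m / 2).natAbs := by omega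
      have hband2 : PySem.Int.band m (-m) = 2 * PySem.Int.band (m / 2) (-(m / 2)) := by
        rw [pv_band_neg_self m hm, pv_band_neg_self (m / 2) hm2, hpe]
        rw [pv_and_pred_even (m / 2).natAbs hq]
        have hle : (m / 2).natAbs &&& ((m / 2).natAbs - 1) ≤ (m / 2).natAbs - 1 :=
          Nat.and_le_right
        omega
      have hbpos : 0 < PySem.Int.band (m / 2) (-(m / 2)) := pv_band_pos _ hm2
      have hbl : PySem.Int.bitLength (PySem.Int.band m (-m))
          = PySem.Int.bitLength (PySem.Int.band (m / 2) (-(m / 2))) + 1 := by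
        rw [PySem.Int.bitLength_of_pos (by omega : 0 < PySem.Int.band m (-m))]
        congr 1
        rw [PySem.Int.floordiv_eq_ediv_of_pos (by norm_num : (0:Int) < 2), hband2]
        have hc : (2 * PySem.Int.band (m / 2) (-(m / 2))) / 2
            = PySem.Int.band (m / 2) (-(m / 2)) := by omega
        rw [hc]
      have hbl1 : 1 ≤ PySem.Int.bitLength (PySem.Int.band (m / 2) (-(m / 2))) := by
        rw [PySem.Int.bitLength_of_pos hbpos]; omega
      rw [pvDivLoop, dif_pos ⟨hmod, hm⟩, hfd, ih (p / 2) hplt (m / 2) habs hm2 (v + 1)]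
      set t := PySem.Int.bitLength (PySem.Int.band (m / 2) (-(m / 2))) - 1 with ht
      have hbt : PySem.Int.bitLength (PySem.Int.band m (-m)) - 1 = t + 1 := by omega
      rw [hbt, Prod.mk.injEq]
      refine ⟨?_, ?_⟩
      · -- shifts agree: m >>> (t+1) = (m/2) >>> t
        rw [Int.shiftRight_eq_div_pow, Int.shiftRight_eq_div_pow,
          Int.ediv_ediv_eq_ediv_mul (by norm_num : (0:Int) ≤ 2)]
        norm_num [pow_succ, mul_comm]
      · push_cast; ring
    · -- m odd: loop stops; band m (-m) = 1
      have hmod : PySem.Int.mod m 2 ≠ 0 := by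
        rw [PySem.Int.mod_eq_emod_of_pos (by norm_num : (0:Int) < 2)]; omega
      have hop : m.natAbs % 2 = 1 := by omega
      have hband1 : PySem.Int.band m (-m) = 1 := by
        rw [pv_band_neg_self m hm, pv_and_pred_odd m.natAbs hop]
        have : 0 < m.natAbs := by omega
        omega
      rw [pvDivLoop, dif_neg (by tauto), hband1]
      have hbl1 : PySem.Int.bitLength (1 : Int) = 1 := by decide
      rw [hbl1]
      simp

-- one orbit step of A equals one step of B
theorem pv_orbit_eq : ∀ (fuel : Nat) (x : Int) (acc : List String),
    pvOrbitA x fuel acc = pvOrbitB x fuel acc := by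
  intro fuel
  induction fuel with
  | zero => intro x acc; rfl
  | succ k ih =>
    intro x acc
    by_cases hx : x = 1
    · simp [pvOrbitA, pvOrbitB, hx]
    · have hm : (3 * x + 1) ≠ 0 := by omega
      have hstep := pv_divLoop_eq (3 * x + 1).natAbs (3 * x + 1) rfl hm 0
      simp only [pvOrbitA, pvOrbitB, if_neg hx, syracuse_with_symbol, hstep]
      rw [ih]
      norm_num

-- ===== VERDICT (by name: the statement is the Claim_ definition above) =====
theorem syracuse_symbol_orbit_spec : Claim_equal_syracuse_symbol_orbit := by
  intro n max_steps _
  unfold Spec_syracuse_symbol_orbit syracuse_symbol_orbit syracuse_symbol_orbit_alt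
  exact pv_orbit_eq max_steps.toNat n []
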